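-- pv_equiv track=rewrite | github.com/Aadityagoel15/OrionTest-Agentic-AI-driven-Automation | agents/feature_to_stepdef_agent.py | _extract_steps_from_feature
-- ===== SOURCE A (Python) =====
-- def _extract_steps_from_feature(feature_content: str) -> list:
--     """Extract all step text from feature file"""
--     steps = []
--     step_keywords = ["Given", "When", "Then", "And", "But"]
--
--     for line in feature_content.splitlines():
--         stripped = line.strip()
--         for keyword in step_keywords:
--             if stripped.startswith(f"{keyword} "):
--                 step_text = stripped[len(keyword):].strip()
--                 steps.append(step_text)
--                 break
--
--     return steps
-- ===== SOURCE B (Python) =====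
-- def _extract_steps_from_feature(feature_content: str) -> list:
--     """Extract all step text from feature file"""
--     # Build a flat keyword DFA once: transitions[(state, ch)] -> next state,
--     # with -1 as the accepting state reached on "<keyword> ".
--     transitions = {}
--     next_state = 1
--     for kw in ("Given", "When", "Then", "And", "But"):
--         state = 0
--         for ch in kw:
--             key = (state, ch)
--             if key not in transitions:
--                 transitions[key] = next_state
--                 next_state += 1
--             state = transitions[key]
--         transitions[(state, " ")] = -1
--     steps = []
--     for line in feature_content.splitlines():
--         stripped = line.strip()
--         state = 0
--         for i, ch in enumerate(stripped):
--             state = transitions.get((state, ch))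
--             if state is None:
--                 break
--             if state == -1:
--                 steps.append(stripped[i + 1:].strip())
--                 break
--     return steps
-- ===== Notes on version B (the rewrite author's own statement) =====
-- stated objective: alternative
-- what changed: A tests each stripped line against the five keyword strings with an inner startswith loop; B builds a flat keyword-DFA transition table once and runs each stripped line through it character by character, emitting the stripped text after the accepting space transition.
import Mathlib
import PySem

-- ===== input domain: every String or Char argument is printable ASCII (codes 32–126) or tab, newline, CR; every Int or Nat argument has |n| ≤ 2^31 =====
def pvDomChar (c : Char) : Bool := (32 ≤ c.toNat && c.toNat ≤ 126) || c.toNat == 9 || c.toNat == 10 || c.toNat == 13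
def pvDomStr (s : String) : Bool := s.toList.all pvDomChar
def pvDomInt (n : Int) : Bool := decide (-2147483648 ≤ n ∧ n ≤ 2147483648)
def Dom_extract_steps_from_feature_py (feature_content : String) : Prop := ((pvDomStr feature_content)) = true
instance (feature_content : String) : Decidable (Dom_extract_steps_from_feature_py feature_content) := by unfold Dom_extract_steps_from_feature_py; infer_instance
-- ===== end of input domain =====

-- B replaces A's per-line scan over the five keyword strings by a keyword DFA (a flat
-- transition table built once) that each stripped line is run through character by
-- character (objective: alternative — different algorithm/data structure, same cost).

-- ===== PORT A =====
def pvStepKeywords : List String := ["Given", "When", "Then", "And", "But"]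

-- A's inner loop: 'for keyword in step_keywords: if stripped.startswith(keyword + " "): append; break'
def pvAKwLoop (stripped : List Char) (steps : List String) : List String → List String
  | [] => steps
  | kw :: rest =>
      if PySem.Chars.startswith stripped (kw.toList ++ [' ']) then
        steps ++ [String.ofList (PySem.Chars.strip
          (PySem.Chars.slice stripped (some (kw.toList.length : Int)) none))]
      else pvAKwLoop stripped steps rest

def extract_steps_from_feature_py (feature_content : String) : List String :=
  (PySem.Str.splitlines feature_content).foldl
    (fun steps line => pvAKwLoop (PySem.Chars.strip line.toList) steps pvStepKeywords) []

-- ===== PORT B =====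
-- Source B's DFA-build loop: transitions[(state, ch)] -> next state, -1 = accept after "<keyword> ";
-- fold state is (transitions, next_state, state)
def pvBBuild : PySem.Dict (Int × Char) Int × Int :=
  (["Given", "When", "Then", "And", "But"] : List String).foldl
    (fun acc kw =>
      let r := kw.toList.foldl
        (fun (st : PySem.Dict (Int × Char) Int × Int × Int) ch =>
          match st.1.get? (st.2.2, ch) with
          | some s => (st.1, st.2.1, s)
          | none => (st.1.insert (st.2.2, ch) st.2.1, st.2.1 + 1, st.2.1))
        (acc.1, acc.2, 0)
      (r.1.insert (r.2.2, ' ') (-1), r.2.1))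
    (PySem.Dict.empty, 1)

def pvBTrans : PySem.Dict (Int × Char) Int := pvBBuild.1

-- Source B's inner 'for i, ch in enumerate(stripped)' DFA run: some rest = accept with
-- rest = stripped[i+1:] (the characters after the matched "<keyword> "), none = no step line
def pvBWalk : Int → List Char → Option (List Char)
  | _, [] => none
  | state, ch :: rest =>
      match pvBTrans.get? (state, ch) with
      | none => none
      | some s => if s = -1 then some rest else pvBWalk s rest

def pvBLine (steps : List String) (line : String) : List String :=
  match pvBWalk 0 (PySem.Chars.strip line.toList) with
  | some rest => steps ++ [String.ofList (PySem.Chars.strip rest)]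
  | none => steps

def extract_steps_from_feature_py_alt (feature_content : String) : List String :=
  (PySem.Str.splitlines feature_content).foldl pvBLine []

-- ===== PRECONDITION & SPEC =====
def Spec_extract_steps_from_feature_py (feature_content : String) (out : List String) : Prop := out = extract_steps_from_feature_py_alt feature_content
instance (feature_content : String) (out : List String) : Decidable (Spec_extract_steps_from_feature_py feature_content out) := by unfold Spec_extract_steps_from_feature_py; infer_instance

-- ===== CLAIM (what is proved, stated in full; the proofs are below) =====
def Claim_equal_extract_steps_from_feature_py : Prop := ∀ (feature_content : String), Dom_extract_steps_from_feature_py feature_content → Spec_extract_steps_from_feature_py feature_content (extract_steps_from_feature_py feature_content)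

-- ===== LEMMAS AND PROOFS =====

-- the transition table Source B's build loop produces, as a literal
def pvTLit : PySem.Dict (Int × Char) Int := PySem.Dict.mk
  [((0, 'G'), 1), ((1, 'i'), 2), ((2, 'v'), 3), ((3, 'e'), 4), ((4, 'n'), 5), ((5, ' '), -1),
   ((0, 'W'), 6), ((6, 'h'), 7), ((7, 'e'), 8), ((8, 'n'), 9), ((9, ' '), -1),
   ((0, 'T'), 10), ((10, 'h'), 11), ((11, 'e'), 12), ((12, 'n'), 13), ((13, ' '), -1),
   ((0, 'A'), 14), ((14, 'n'), 15), ((15, 'd'), 16), ((16, ' '), -1),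
   ((0, 'B'), 17), ((17, 'u'), 18), ((18, 't'), 19), ((19, ' '), -1)]

theorem pvBTrans_eq : pvBTrans = pvTLit := by decide

-- lookups in the start state
theorem pv_get0 (c : Char) : pvBTrans.get? (0, c) =
    if c = 'G' then some 1 else if c = 'W' then some 6 else if c = 'T' then some 10
    else if c = 'A' then some 14 else if c = 'B' then some 17 else none := by
  rw [pvBTrans_eq]
  by_cases h1 : c = 'G'
  · simp [pvTLit, PySem.Dict.get?_mk_cons, h1]
  by_cases h2 : c = 'W'
  · simp [pvTLit, PySem.Dict.get?_mk_cons, h2]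
  by_cases h3 : c = 'T'
  · simp [pvTLit, PySem.Dict.get?_mk_cons, h3]
  by_cases h4 : c = 'A'
  · simp [pvTLit, PySem.Dict.get?_mk_cons, h4]
  by_cases h5 : c = 'B'
  · simp [pvTLit, PySem.Dict.get?_mk_cons, h5]
  rw [if_neg h1, if_neg h2, if_neg h3, if_neg h4, if_neg h5]
  simp [pvTLit, PySem.Dict.get?]
  exact ⟨fun h => h1 h.symm, fun h => h2 h.symm, fun h => h3 h.symm,
    fun h => h4 h.symm, fun h => h5 h.symm⟩

-- lookups in a mid-chain state k whose only transition is (k, e) -> v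
theorem pv_getk (k v : Int) (e : Char) (hkv : pvTLit.get? (k, e) = some v)
    (hk : ∀ p ∈ pvTLit.items, p.1.1 = k → p.1.2 = e) (c : Char) :
    pvBTrans.get? (k, c) = if c = e then some v else none := by
  rw [pvBTrans_eq]
  by_cases hc : c = e
  · rw [hc, if_pos rfl]; exact hkv
  · rw [if_neg hc]
    rw [PySem.Dict.get?_eq_none_iff_not_mem_keys]
    intro hmem
    simp only [PySem.Dict.keys, List.mem_map] at hmem
    obtain ⟨p, hp, hpk⟩ := hmem
    have he := hk p hp (by rw [hpk])
    rw [hpk] at he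
    exact hc he

-- walk from an accepting-edge state: only "(k, ' ') -> -1" applies
theorem pv_walk_accept (k : Int)
    (h : ∀ c, pvBTrans.get? (k, c) = if c = ' ' then some (-1) else none) :
    ∀ s, pvBWalk k s = if [' '] <+: s then some (s.drop 1) else none := by
  intro s
  cases s with
  | nil => simp [pvBWalk]
  | cons c r =>
      simp only [pvBWalk, h c]
      by_cases hc : c = ' '
      · simp [hc, List.cons_prefix_cons]
      · rw [if_neg hc]
        have hnp : ¬ [' '] <+: (c :: r) := by
          rw [List.cons_prefix_cons]; exact fun ⟨he, _⟩ => hc he.symm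
        simp [hnp]

-- walk from a mid-chain state: one forced character, then the rest of the chain
theorem pv_walk_step (k k' : Int) (e : Char) (u : List Char) (n : Nat)
    (hk' : k' ≠ -1)
    (h : ∀ c, pvBTrans.get? (k, c) = if c = e then some k' else none)
    (ih : ∀ s, pvBWalk k' s = if u <+: s then some (s.drop n) else none) :
    ∀ s, pvBWalk k s = if (e :: u) <+: s then some (s.drop (n + 1)) else none := by
  intro s
  cases s with
  | nil => simp [pvBWalk]
  | cons c r =>
      simp only [pvBWalk, h c]
      by_cases hc : c = e
      · subst hc; simp [hk', ih r, List.cons_prefix_cons]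
      · rw [if_neg hc]
        have hnp : ¬ (e :: u) <+: (c :: r) := by
          rw [List.cons_prefix_cons]; exact fun ⟨he, _⟩ => hc he.symm
        simp [hnp]

-- the five keyword chains
theorem pv_walkGiven : ∀ s, pvBWalk 1 s =
    if ['i','v','e','n',' '] <+: s then some (s.drop 5) else none :=
  pv_walk_step 1 2 'i' _ 4 (by decide) (pv_getk 1 2 'i' (by decide) (by decide))
    (pv_walk_step 2 3 'v' _ 3 (by decide) (pv_getk 2 3 'v' (by decide) (by decide))
      (pv_walk_step 3 4 'e' _ 2 (by decide) (pv_getk 3 4 'e' (by decide) (by decide))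
        (pv_walk_step 4 5 'n' _ 1 (by decide) (pv_getk 4 5 'n' (by decide) (by decide))
          (pv_walk_accept 5 (pv_getk 5 (-1) ' ' (by decide) (by decide))))))

theorem pv_walkWhen : ∀ s, pvBWalk 6 s =
    if ['h','e','n',' '] <+: s then some (s.drop 4) else none :=
  pv_walk_step 6 7 'h' _ 3 (by decide) (pv_getk 6 7 'h' (by decide) (by decide))
    (pv_walk_step 7 8 'e' _ 2 (by decide) (pv_getk 7 8 'e' (by decide) (by decide))
      (pv_walk_step 8 9 'n' _ 1 (by decide) (pv_getk 8 9 'n' (by decide) (by decide))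
        (pv_walk_accept 9 (pv_getk 9 (-1) ' ' (by decide) (by decide)))))

theorem pv_walkThen : ∀ s, pvBWalk 10 s =
    if ['h','e','n',' '] <+: s then some (s.drop 4) else none :=
  pv_walk_step 10 11 'h' _ 3 (by decide) (pv_getk 10 11 'h' (by decide) (by decide))
    (pv_walk_step 11 12 'e' _ 2 (by decide) (pv_getk 11 12 'e' (by decide) (by decide))
      (pv_walk_step 12 13 'n' _ 1 (by decide) (pv_getk 12 13 'n' (by decide) (by decide))
        (pv_walk_accept 13 (pv_getk 13 (-1) ' ' (by decide) (by decide)))))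

theorem pv_walkAnd : ∀ s, pvBWalk 14 s =
    if ['n','d',' '] <+: s then some (s.drop 3) else none :=
  pv_walk_step 14 15 'n' _ 2 (by decide) (pv_getk 14 15 'n' (by decide) (by decide))
    (pv_walk_step 15 16 'd' _ 1 (by decide) (pv_getk 15 16 'd' (by decide) (by decide))
      (pv_walk_accept 16 (pv_getk 16 (-1) ' ' (by decide) (by decide))))

theorem pv_walkBut : ∀ s, pvBWalk 17 s =
    if ['u','t',' '] <+: s then some (s.drop 3) else none :=
  pv_walk_step 17 18 'u' _ 2 (by decide) (pv_getk 17 18 'u' (by decide) (by decide))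
    (pv_walk_step 18 19 't' _ 1 (by decide) (pv_getk 18 19 't' (by decide) (by decide))
      (pv_walk_accept 19 (pv_getk 19 (-1) ' ' (by decide) (by decide))))

-- full characterisation of Source B's DFA run from the start state
theorem pv_walk0 (s : List Char) :
    pvBWalk 0 s =
      if ['G','i','v','e','n',' '] <+: s then some (s.drop 6)
      else if ['W','h','e','n',' '] <+: s then some (s.drop 5)
      else if ['T','h','e','n',' '] <+: s then some (s.drop 5)
      else if ['A','n','d',' '] <+: s then some (s.drop 4)
      else if ['B','u','t',' '] <+: s then some (s.drop 4)
      else none := by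
  cases s with
  | nil => simp [pvBWalk]
  | cons c r =>
      simp only [pvBWalk, pv_get0 c]
      by_cases h1 : c = 'G'
      · subst h1; simp [pv_walkGiven r, List.cons_prefix_cons]
      by_cases h2 : c = 'W'
      · subst h2; simp [pv_walkWhen r, List.cons_prefix_cons]
      by_cases h3 : c = 'T'
      · subst h3; simp [pv_walkThen r, List.cons_prefix_cons]
      by_cases h4 : c = 'A'
      · subst h4; simp [pv_walkAnd r, List.cons_prefix_cons]
      by_cases h5 : c = 'B'
      · subst h5; simp [pv_walkBut r, List.cons_prefix_cons]
      rw [if_neg h1, if_neg h2, if_neg h3, if_neg h4, if_neg h5]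
      have n1 : ¬ ['G','i','v','e','n',' '] <+: (c :: r) := by
        rw [List.cons_prefix_cons]; exact fun ⟨he, _⟩ => h1 he.symm
      have n2 : ¬ ['W','h','e','n',' '] <+: (c :: r) := by
        rw [List.cons_prefix_cons]; exact fun ⟨he, _⟩ => h2 he.symm
      have n3 : ¬ ['T','h','e','n',' '] <+: (c :: r) := by
        rw [List.cons_prefix_cons]; exact fun ⟨he, _⟩ => h3 he.symm
      have n4 : ¬ ['A','n','d',' '] <+: (c :: r) := by
        rw [List.cons_prefix_cons]; exact fun ⟨he, _⟩ => h4 he.symm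
      have n5 : ¬ ['B','u','t',' '] <+: (c :: r) := by
        rw [List.cons_prefix_cons]; exact fun ⟨he, _⟩ => h5 he.symm
      simp [n1, n2, n3, n4, n5]

theorem pv_strip_cons_space (t : List Char) :
    PySem.Chars.strip (' ' :: t) = PySem.Chars.strip t := by
  simp [PySem.Chars.strip, PySem.Chars.lstrip, PySem.Chars.isspace]

-- A appends strip(stripped[len(kw):]); when (kw ++ " ") <+: s that is strip of the DFA's rest
theorem pv_append_eq (kw t : List Char) :
    PySem.Chars.strip (PySem.Chars.slice (kw ++ ' ' :: t) (some (kw.length : Int)) none) =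
      PySem.Chars.strip t := by
  rw [PySem.Chars.slice_eq_listSlice, PySem.List.slice_from_natCast]
  rw [show kw ++ ' ' :: t = kw ++ ([' '] ++ t) by simp, List.drop_left]
  exact pv_strip_cons_space t

-- per-line agreement of A's keyword loop and Source B's DFA run, over an arbitrary stripped line
theorem pv_line_core (steps : List String) (s : List Char) :
    pvAKwLoop s steps pvStepKeywords =
      match pvBWalk 0 s with
      | some rest => steps ++ [String.ofList (PySem.Chars.strip rest)]
      | none => steps := by
  have hsw : ∀ kw : List Char, PySem.Chars.startswith s kw = decide (kw <+: s) := by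
    intro kw
    by_cases h : kw <+: s
    · simp [PySem.Chars.startswith_iff s kw, h]
    · rw [decide_eq_false h, Bool.eq_false_iff]
      intro hc
      exact h ((PySem.Chars.startswith_iff s kw).mp hc)
  simp only [pvAKwLoop, pvStepKeywords, pv_walk0 s,
    show ("Given".toList ++ [' ']) = ['G','i','v','e','n',' '] from by decide,
    show ("When".toList ++ [' ']) = ['W','h','e','n',' '] from by decide,
    show ("Then".toList ++ [' ']) = ['T','h','e','n',' '] from by decide,
    show ("And".toList ++ [' ']) = ['A','n','d',' '] from by decide,
    show ("But".toList ++ [' ']) = ['B','u','t',' '] from by decide, hsw]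
  by_cases h1 : ['G','i','v','e','n',' '] <+: s
  · obtain ⟨t, rfl⟩ := h1
    simp [List.cons_prefix_cons]
    exact congrArg String.ofList (pv_append_eq "Given".toList t)
  by_cases h2 : ['W','h','e','n',' '] <+: s
  · obtain ⟨t, rfl⟩ := h2
    simp [List.cons_prefix_cons]
    exact congrArg String.ofList (pv_append_eq "When".toList t)
  by_cases h3 : ['T','h','e','n',' '] <+: s
  · obtain ⟨t, rfl⟩ := h3
    simp [List.cons_prefix_cons]
    exact congrArg String.ofList (pv_append_eq "Then".toList t)
  by_cases h4 : ['A','n','d',' '] <+: s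
  · obtain ⟨t, rfl⟩ := h4
    simp [List.cons_prefix_cons]
    exact congrArg String.ofList (pv_append_eq "And".toList t)
  by_cases h5 : ['B','u','t',' '] <+: s
  · obtain ⟨t, rfl⟩ := h5
    simp [List.cons_prefix_cons]
    exact congrArg String.ofList (pv_append_eq "But".toList t)
  simp [h1, h2, h3, h4, h5]

theorem pv_line_eq (steps : List String) (line : String) :
    pvAKwLoop (PySem.Chars.strip line.toList) steps pvStepKeywords = pvBLine steps line :=
  pv_line_core steps (PySem.Chars.strip line.toList)

-- ===== VERDICT (by name: the statement is the Claim_ definition above) =====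
theorem extract_steps_from_feature_py_spec : Claim_equal_extract_steps_from_feature_py := by
  intro feature_content _
  unfold Spec_extract_steps_from_feature_py
  unfold extract_steps_from_feature_py extract_steps_from_feature_py_alt
  exact PySem.List.foldl_congr_mem _ _ _ _ (fun acc x _ => pv_line_eq acc x)
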